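-- pv_equiv track=rewrite | github.com/inclement/phutball | abstractboard.py | get_speculative_move_identifiers
-- ===== SOURCE A (Python) =====
-- def get_speculative_move_identifiers(coords, steps):
--     '''Returns a list of speculative move identifiers from end coords
--     (coords) and a list of steps. Returns a list of 4-tuples containing
--     the identifiers.
--     '''
--     identifiers = []
--     for i in range(len(steps)-1):
--         cur = steps[i]
--         nex = steps[i+1]
--         identifiers.append((cur[0], cur[1], nex[0], nex[1]))
--     if len(steps) > 0:
--         identifiers.append((steps[-1][0], steps[-1][1], coords[0], coords[1]))
--     return identifiers
-- ===== SOURCE B (Python) =====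
-- def get_speculative_move_identifiers(coords, steps):
--     '''Backwards single pass: walk the steps from the last to the first,
--     carrying the successor point (initially coords) as state, then reverse
--     the collected identifiers. No indexing, no shifted copy, no special case.'''
--     identifiers = []
--     nxt = coords
--     for cur in reversed(steps):
--         identifiers.append((cur[0], cur[1], nxt[0], nxt[1]))
--         nxt = cur
--     identifiers.reverse()
--     return identifiers
-- ===== Notes on version B (the rewrite author's own statement) =====
-- stated objective: alternative
-- what changed: Replaces the forward index loop over range(len(steps)-1) plus a trailing len(steps)>0 special-case append with a single backwards traversal that carries the successor point as accumulator state (seeded with coords) and reverses the result, eliminating all indexing and the special case.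
import Mathlib
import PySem

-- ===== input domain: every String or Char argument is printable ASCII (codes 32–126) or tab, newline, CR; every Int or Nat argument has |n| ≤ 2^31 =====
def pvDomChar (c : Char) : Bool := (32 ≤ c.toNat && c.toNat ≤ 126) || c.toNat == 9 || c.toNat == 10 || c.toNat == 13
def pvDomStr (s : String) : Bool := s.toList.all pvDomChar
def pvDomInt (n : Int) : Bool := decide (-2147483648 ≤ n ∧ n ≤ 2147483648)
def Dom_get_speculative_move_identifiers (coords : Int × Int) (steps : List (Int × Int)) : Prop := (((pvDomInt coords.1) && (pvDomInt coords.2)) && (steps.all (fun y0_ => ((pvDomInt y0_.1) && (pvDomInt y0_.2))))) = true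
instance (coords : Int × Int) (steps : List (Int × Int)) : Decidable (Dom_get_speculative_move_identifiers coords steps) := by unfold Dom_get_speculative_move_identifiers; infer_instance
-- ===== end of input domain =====

-- B replaces the forward index loop + trailing special case with one backwards pass carrying the successor point as state; objective: alternative (same O(n) cost).
-- ===== PORT A =====
-- Literal port of A. All indices (i, i+1 for i in range(len-1), and -1 when the
-- list is nonempty) are provably in range, so pyGetD with a dummy default is exact.
def get_speculative_move_identifiers (coords : Int × Int) (steps : List (Int × Int)) : List (Int × Int × Int × Int) :=
  let identifiers : List (Int × Int × Int × Int) :=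
    (PySem.List.pyRange 0 ((steps.length : Int) - 1) 1).foldl
      (fun acc i =>
        let cur := PySem.List.pyGetD steps i ((0 : Int), (0 : Int))
        let nex := PySem.List.pyGetD steps (i + 1) ((0 : Int), (0 : Int))
        acc ++ [(cur.1, cur.2, nex.1, nex.2)]) []
  if steps.length > 0 then
    let last := PySem.List.pyGetD steps (-1) ((0 : Int), (0 : Int))
    identifiers ++ [(last.1, last.2, coords.1, coords.2)]
  else identifiers

-- ===== PORT B =====
-- Port of B: fold over reversed(steps) carrying (identifiers, nxt); reverse at the end.
def get_speculative_move_identifiers_alt (coords : Int × Int) (steps : List (Int × Int)) : List (Int × Int × Int × Int) :=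
  let st := steps.reverse.foldl
    (fun (st : List (Int × Int × Int × Int) × (Int × Int)) cur =>
      (st.1 ++ [(cur.1, cur.2, st.2.1, st.2.2)], cur))
    ([], coords)
  st.1.reverse

-- ===== PRECONDITION & SPEC =====
def Spec_get_speculative_move_identifiers (coords : Int × Int) (steps : List (Int × Int)) (out : List (Int × Int × Int × Int)) : Prop := out = get_speculative_move_identifiers_alt coords steps
instance (coords : Int × Int) (steps : List (Int × Int)) (out : List (Int × Int × Int × Int)) : Decidable (Spec_get_speculative_move_identifiers coords steps out) := by unfold Spec_get_speculative_move_identifiers; infer_instance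

-- ===== CLAIM (what is proved, stated in full; the proofs are below) =====
def Claim_equal_get_speculative_move_identifiers : Prop := ∀ (coords : Int × Int) (steps : List (Int × Int)), Dom_get_speculative_move_identifiers coords steps → Spec_get_speculative_move_identifiers coords steps (get_speculative_move_identifiers coords steps)

-- ===== LEMMAS AND PROOFS =====

-- Both ports equal this zip characterisation: each step paired with its successor.
def pvZip (c : Int × Int) (l : List (Int × Int)) : List (Int × Int × Int × Int) :=
  (l.zip (l.tail ++ [c])).map (fun p => (p.1.1, p.1.2, p.2.1, p.2.2))

theorem pvA_eq_zip (coords : Int × Int) (steps : List (Int × Int)) :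
    get_speculative_move_identifiers coords steps = pvZip coords steps := by
  unfold get_speculative_move_identifiers pvZip
  simp only [PySem.List.foldl_append_singleton_eq_map, List.nil_append]
  cases steps with
  | nil => simp [PySem.List.pyRange_one_eq_nil]
  | cons x xs =>
    simp only [List.length_cons, List.tail_cons]
    rw [if_pos (by omega)]
    rw [show ((xs.length + 1 : Nat) : Int) - 1 = ((xs.length : Nat) : Int) by push_cast; ring]
    rw [PySem.List.pyRange_zero_nat]
    apply List.ext_getElem
    · simp
    · intro i h1 h2
      simp only [List.length_append, List.length_map, List.length_range,
        List.length_cons, List.length_zip, List.length_nil] at h1 h2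
      rw [List.getElem_map]
      rw [List.getElem_zip]
      rcases Nat.lt_or_ge i xs.length with hi | hi
      · rw [List.getElem_append_left (by simpa using hi)]
        rw [List.getElem_map, List.getElem_map, List.getElem_range]
        rw [List.getElem_append_left hi]
        rw [show ((i : Int) + 1) = ((i + 1 : Nat) : Int) by push_cast; ring]
        rw [PySem.List.pyGetD_natCast, PySem.List.pyGetD_natCast]
        rw [List.getD_eq_getElem _ _ (by simp; omega),
          List.getD_eq_getElem _ _ (by simp; omega)]
        simp
      · have hie : i = xs.length := by omega
        subst hie
        rw [List.getElem_append_right (by simp)]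
        simp [PySem.List.pyGetD_neg_one (x :: xs) _ (by simp),
          List.getLast_eq_getElem, List.getElem_append_right (Nat.le_refl _)]

theorem pvZip_snoc : ∀ (ys : List (Int × Int)) (x c : Int × Int),
    pvZip c (ys ++ [x]) = pvZip x ys ++ [(x.1, x.2, c.1, c.2)] := by
  intro ys
  induction ys with
  | nil => intro x c; simp [pvZip]
  | cons y ys ih =>
    intro x c
    cases ys with
    | nil => simp [pvZip]
    | cons y' ys' =>
      have h := ih x c
      simp only [pvZip, List.cons_append, List.tail_cons, List.zip_cons_cons,
        List.map_cons] at h ⊢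
      rw [h]

theorem pv_fold (l : List (Int × Int)) :
    ∀ (acc : List (Int × Int × Int × Int)) (c : Int × Int),
    l.foldl (fun (st : List (Int × Int × Int × Int) × (Int × Int)) cur =>
        (st.1 ++ [(cur.1, cur.2, st.2.1, st.2.2)], cur)) (acc, c)
      = (acc ++ (pvZip c l.reverse).reverse, l.getLast?.getD c) := by
  induction l with
  | nil => intro acc c; simp [pvZip]
  | cons x xs ih =>
    intro acc c
    simp only [List.foldl_cons]
    rw [ih]
    refine Prod.ext ?_ ?_
    · rw [List.reverse_cons, pvZip_snoc]
      simp
    · cases xs <;> simp [List.getLast?_cons]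

theorem pvB_eq_zip (coords : Int × Int) (steps : List (Int × Int)) :
    get_speculative_move_identifiers_alt coords steps = pvZip coords steps := by
  unfold get_speculative_move_identifiers_alt
  rw [pv_fold]
  simp

-- ===== VERDICT (by name: the statement is the Claim_ definition above) =====
theorem get_speculative_move_identifiers_spec : Claim_equal_get_speculative_move_identifiers := by
  intro coords steps _
  unfold Spec_get_speculative_move_identifiers
  rw [pvA_eq_zip, pvB_eq_zip]
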